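-- pv_equiv track=rewrite | github.com/Mcusac/kaggle-ml-comp-scripts | scripts/layers/layer_2_devtools/level_0_infra/level_0/format/scan_violation_summary.py | format_scan_violation_summary_lines
-- ===== SOURCE A (Python) =====
-- from collections import defaultdict
-- from typing import Any
--
-- def format_scan_violation_summary_lines(data: dict[str, Any]) -> list[str]:
--     """Build text lines describing violations by kind from scan payload."""
--     by_kind: dict[str, list[str]] = defaultdict(list)
--     for v in data.get("violations", []):
--         by_kind[v["kind"]].append(v["file"])
--     lines: list[str] = []
--     lines.append(f"[SCAN] generated: {data.get('generated')}")
--     lines.append("[SCAN] violations by kind:")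
--     for kind in (
--         "DEEP_PATH",
--         "RELATIVE_IN_LOGIC",
--         "WRONG_LEVEL",
--         "UPWARD",
--         "PARSE_ERROR",
--     ):
--         files = sorted(set(by_kind.get(kind, [])))
--         if files:
--             lines.append(f"  {kind}: {len(files)} file(s)")
--             for f in files:
--                 lines.append(f"    - {f}")
--     pe = data.get("parse_errors") or []
--     if pe:
--         lines.append(f"  PARSE_ERROR entries: {len(pe)}")
--     return lines
-- ===== SOURCE B (Python) =====
-- def format_scan_violation_summary_lines(data):
--     """Build text lines describing violations by kind from scan payload."""
--     violations = data.get("violations", [])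
--
--     def section(kind):
--         files = sorted({v["file"] for v in violations if v["kind"] == kind})
--         if not files:
--             return []
--         return [f"  {kind}: {len(files)} file(s)"] + [f"    - {f}" for f in files]
--
--     pe = data.get("parse_errors") or []
--     return (
--         [f"[SCAN] generated: {data.get('generated')}", "[SCAN] violations by kind:"]
--         + [line
--            for kind in ("DEEP_PATH", "RELATIVE_IN_LOGIC", "WRONG_LEVEL", "UPWARD", "PARSE_ERROR")
--            for line in section(kind)]
--         + ([f"  PARSE_ERROR entries: {len(pe)}"] if pe else [])
--     )
-- ===== Notes on version B (the rewrite author's own statement) =====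
-- stated objective: simpler
-- what changed: Drops the defaultdict grouping pass and the mutating append loop: each kind's section is computed by an independent filter-and-sort scan of the violations list and the result is one declarative concatenation of sections.
import Mathlib
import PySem

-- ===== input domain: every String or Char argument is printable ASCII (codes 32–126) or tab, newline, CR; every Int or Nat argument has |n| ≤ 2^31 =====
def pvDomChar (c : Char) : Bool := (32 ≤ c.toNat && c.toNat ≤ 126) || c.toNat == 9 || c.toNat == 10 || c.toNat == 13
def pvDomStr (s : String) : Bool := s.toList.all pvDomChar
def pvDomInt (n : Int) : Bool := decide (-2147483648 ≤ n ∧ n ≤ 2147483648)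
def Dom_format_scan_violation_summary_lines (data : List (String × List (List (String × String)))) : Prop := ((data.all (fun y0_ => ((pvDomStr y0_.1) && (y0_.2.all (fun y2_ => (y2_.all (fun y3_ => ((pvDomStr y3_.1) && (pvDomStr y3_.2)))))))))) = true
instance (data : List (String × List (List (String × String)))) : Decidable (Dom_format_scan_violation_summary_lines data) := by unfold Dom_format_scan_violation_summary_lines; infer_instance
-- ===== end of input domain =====

-- B replaces A's defaultdict grouping pass and mutating appends by five independent
-- filter-and-sort scans of the violations list, concatenated declaratively (objective: simpler).

-- Shared transliteration of the f-string rendering `f"{data.get('generated')}"` (Python str()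
-- of `None` / a list of str→str dicts); exact on printable-ASCII + tab/newline/CR strings and
-- dicts with distinct keys (always true for values coming from Python dicts).
def pvEscChar (q : Char) (c : Char) : List Char :=
  if c = '\\' then ['\\', '\\']
  else if c = q then ['\\', q]
  else if c = Char.ofNat 9 then ['\\', 't']
  else if c = Char.ofNat 10 then ['\\', 'n']
  else if c = Char.ofNat 13 then ['\\', 'r']
  else [c]

def pvReprStr (s : String) : String :=
  let cs := s.toList
  let q : Char := if cs.contains '\'' && !(cs.contains '"') then '"' else '\''
  String.ofList ([q] ++ cs.flatMap (pvEscChar q) ++ [q])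

def pvJoin (sep : String) : List String → String
  | [] => ""
  | [x] => x
  | x :: y :: xs => x ++ sep ++ pvJoin sep (y :: xs)

def pvReprDict (d : List (String × String)) : String :=
  "{" ++ pvJoin ", " (d.map (fun p => pvReprStr p.1 ++ ": " ++ pvReprStr p.2)) ++ "}"

def pvReprOpt : Option (List (List (String × String))) → String
  | none => "None"
  | some l => "[" ++ pvJoin ", " (l.map pvReprDict) ++ "]"

-- ===== PORT A =====
-- v["kind"] / v["file"] raise KeyError when the key is missing; those inputs are outside
-- Pre_ below, here the lookup is defaulted to "".
def format_scan_violation_summary_lines (data : List (String × List (List (String × String)))) : List String :=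
  let d := PySem.Dict.mk data
  let by_kind : PySem.Dict String (List String) :=
    ((d.get? "violations").getD []).foldl
      (fun bk v => bk.modify ((PySem.Dict.mk v).getD "kind" "") []
        (· ++ [(PySem.Dict.mk v).getD "file" ""]))
      PySem.Dict.empty
  let lines : List String :=
    ["[SCAN] generated: " ++ pvReprOpt (d.get? "generated"), "[SCAN] violations by kind:"]
  let lines :=
    ["DEEP_PATH", "RELATIVE_IN_LOGIC", "WRONG_LEVEL", "UPWARD", "PARSE_ERROR"].foldl
      (fun lines kind =>
        let files := PySem.List.sorted (PySem.Set.ofList (by_kind.getD kind [])) (fun x => x) false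
        if files.isEmpty then lines
        else files.foldl (fun ls f => ls ++ ["    - " ++ f])
          (lines ++ ["  " ++ kind ++ ": " ++ PySem.Int.toStr (files.length : Int) ++ " file(s)"]))
      lines
  let pe := (d.get? "parse_errors").getD []   -- `data.get('parse_errors') or []`
  if pe.isEmpty then lines
  else lines ++ ["  PARSE_ERROR entries: " ++ PySem.Int.toStr (pe.length : Int)]

-- ===== PORT B =====
def pvAltSection (violations : List (List (String × String))) (kind : String) : List String :=
  let files := PySem.List.sorted
    (PySem.Set.ofList ((violations.filter (fun v => ((PySem.Dict.mk v).getD "kind" "") == kind)).map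
      (fun v => (PySem.Dict.mk v).getD "file" "")))
    (fun x => x) false
  if files.isEmpty then []
  else ("  " ++ kind ++ ": " ++ PySem.Int.toStr (files.length : Int) ++ " file(s)")
    :: files.map (fun f => "    - " ++ f)

def format_scan_violation_summary_lines_alt (data : List (String × List (List (String × String)))) : List String :=
  let d := PySem.Dict.mk data
  let violations := (d.get? "violations").getD []
  let pe := (d.get? "parse_errors").getD []
  ["[SCAN] generated: " ++ pvReprOpt (d.get? "generated"), "[SCAN] violations by kind:"]
    ++ (["DEEP_PATH", "RELATIVE_IN_LOGIC", "WRONG_LEVEL", "UPWARD", "PARSE_ERROR"].map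
        (pvAltSection violations)).flatten
    ++ (if pe.isEmpty then []
        else ["  PARSE_ERROR entries: " ++ PySem.Int.toStr (pe.length : Int)])

-- ===== PRECONDITION & SPEC =====
-- Pre_: every violation dict carries both "kind" and "file" — exactly where Python A
-- returns normally (elsewhere v["kind"] / v["file"] raises KeyError).
def Pre_format_scan_violation_summary_lines (data : List (String × List (List (String × String)))) : Prop :=
  ∀ v ∈ ((PySem.Dict.mk data).get? "violations").getD [],
    ((PySem.Dict.mk v).get? "kind").isSome = true ∧ ((PySem.Dict.mk v).get? "file").isSome = true
instance (data : List (String × List (List (String × String)))) : Decidable (Pre_format_scan_violation_summary_lines data) := by unfold Pre_format_scan_violation_summary_lines; infer_instance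

def pvWitness_format_scan_violation_summary_lines : (List (String × List (List (String × String)))) :=
  [("violations", [[("kind", "DEEP_PATH"), ("file", "a.py")], [("kind", "UPWARD"), ("file", "b.py")]]),
   ("parse_errors", [])]

def Spec_format_scan_violation_summary_lines (data : List (String × List (List (String × String)))) (out : List String) : Prop := out = format_scan_violation_summary_lines_alt data
instance (data : List (String × List (List (String × String)))) (out : List String) : Decidable (Spec_format_scan_violation_summary_lines data out) := by unfold Spec_format_scan_violation_summary_lines; infer_instance

-- ===== CLAIM (what is proved, stated in full; the proofs are below) =====
def Claim_equal_format_scan_violation_summary_lines : Prop := ∀ (data : List (String × List (List (String × String)))), Dom_format_scan_violation_summary_lines data → Pre_format_scan_violation_summary_lines data → Spec_format_scan_violation_summary_lines data (format_scan_violation_summary_lines data)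

-- ===== LEMMAS AND PROOFS =====

-- A's grouping dict, looked up at kind k, is B's filter-and-map of the violations list.
lemma group_getD (vs : List (List (String × String))) (k : String) :
    (vs.foldl
      (fun bk v => bk.modify ((PySem.Dict.mk v).getD "kind" "") []
        (· ++ [(PySem.Dict.mk v).getD "file" ""]))
      (PySem.Dict.empty : PySem.Dict String (List String))).getD k []
    = (vs.filter (fun v => ((PySem.Dict.mk v).getD "kind" "") == k)).map
        (fun v => (PySem.Dict.mk v).getD "file" "") := by
  have h1 :
      ((vs.map (fun v => (((PySem.Dict.mk v).getD "kind" ""), ((PySem.Dict.mk v).getD "file" "")))).foldl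
        (fun (bk : PySem.Dict String (List String)) p => bk.modify p.1 [] (· ++ [p.2]))
        PySem.Dict.empty)
      = vs.foldl
          (fun bk v => bk.modify ((PySem.Dict.mk v).getD "kind" "") []
            (· ++ [(PySem.Dict.mk v).getD "file" ""]))
          PySem.Dict.empty := by
    rw [List.foldl_map]
  rw [← h1, PySem.Dict.getD_foldl_modify_append]
  simp [List.filter_map, Function.comp_def]

-- One kind's step of A's line-building loop appends B's section.
lemma section_step (lines : List String) (kind : String) (files : List String) :
    (if files.isEmpty then lines
     else files.foldl (fun ls f => ls ++ ["    - " ++ f])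
       (lines ++ ["  " ++ kind ++ ": " ++ PySem.Int.toStr (files.length : Int) ++ " file(s)"]))
    = lines ++ (if files.isEmpty then []
       else ("  " ++ kind ++ ": " ++ PySem.Int.toStr (files.length : Int) ++ " file(s)")
         :: files.map (fun f => "    - " ++ f)) := by
  split
  · simp
  · rw [PySem.List.foldl_append_singleton_eq_map]
    simp

lemma tail_step (lines : List String) (pe : List (List (String × String))) :
    (if pe.isEmpty then lines
     else lines ++ ["  PARSE_ERROR entries: " ++ PySem.Int.toStr (pe.length : Int)])
    = lines ++ (if pe.isEmpty then []
       else ["  PARSE_ERROR entries: " ++ PySem.Int.toStr (pe.length : Int)]) := by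
  split <;> simp

-- ===== VERDICT (by name: the statement is the Claim_ definition above) =====
theorem format_scan_violation_summary_lines_spec : Claim_equal_format_scan_violation_summary_lines := by
  intro data _ _
  unfold Spec_format_scan_violation_summary_lines
  unfold format_scan_violation_summary_lines format_scan_violation_summary_lines_alt
  simp only [List.foldl, List.map, List.flatten, pvAltSection, group_getD]
  rw [section_step, section_step, section_step, section_step, section_step, tail_step]
  simp [List.append_assoc]
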